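-- pv_equiv track=rewrite | github.com/knishina/python_recursion | 07_DoublingNumbers/DoublingNumbers.py | rice
-- ===== SOURCE A (Python) =====
-- def rice(number_blocks):
--     """
--     Input: The number of blocks on a chess board
--     Output: The total number of grains, an iterative function. For each square, the amount of rice doubles.
--     So for the first square, there is one grain of rice. In the second square, there are two grains of rice. ETC.
--     """
--     total = 0
--     sub_total = 1
--     for thing in range(1, number_blocks + 1):
--         if thing == 1:
--             total += thing
--         else:
--             sub_total *= 2
--             total += sub_total
--     return total
-- ===== SOURCE B (Python) =====
-- def rice(number_blocks):
--     # closed form: squares 1..n hold 1,2,4,... grains, summing to 2**n - 1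
--     if number_blocks < 1:
--         return 0
--     return 2 ** number_blocks - 1
-- ===== Notes on version B (the rewrite author's own statement) =====
-- stated objective: faster
-- what changed: replaces the square-by-square doubling loop with the closed form 2**n - 1 (0 for n < 1)
import Mathlib
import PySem

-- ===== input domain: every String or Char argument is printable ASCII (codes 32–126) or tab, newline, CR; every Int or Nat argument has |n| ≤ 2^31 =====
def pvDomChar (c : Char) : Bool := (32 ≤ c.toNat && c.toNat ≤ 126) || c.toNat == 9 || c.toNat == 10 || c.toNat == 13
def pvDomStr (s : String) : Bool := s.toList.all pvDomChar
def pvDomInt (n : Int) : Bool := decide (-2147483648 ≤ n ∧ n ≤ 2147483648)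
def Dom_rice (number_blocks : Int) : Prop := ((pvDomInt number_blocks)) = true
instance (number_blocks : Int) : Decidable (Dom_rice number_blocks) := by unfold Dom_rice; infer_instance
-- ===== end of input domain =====

-- B replaces A's square-by-square doubling loop with the closed form 2^n - 1 (0 for n < 1); objective: faster.


-- ===== PORT A =====
-- one loop step of A: state = (total, sub_total)
def riceStep (st : Int × Int) (thing : Int) : Int × Int :=
  if thing == 1 then (st.1 + thing, st.2)
  else (st.1 + st.2 * 2, st.2 * 2)

def rice (number_blocks : Int) : Int :=
  ((PySem.List.pyRange 1 (number_blocks + 1) 1).foldl riceStep (0, 1)).1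

-- ===== PORT B =====
def rice_alt (number_blocks : Int) : Int :=
  if number_blocks < 1 then 0 else 2 ^ number_blocks.toNat - 1

-- ===== PRECONDITION & SPEC =====
def Spec_rice (number_blocks : Int) (out : Int) : Prop := out = rice_alt number_blocks
instance (number_blocks : Int) (out : Int) : Decidable (Spec_rice number_blocks out) := by unfold Spec_rice; infer_instance

-- ===== CLAIM (what is proved, stated in full; the proofs are below) =====
def Claim_equal_rice : Prop := ∀ (number_blocks : Int), Dom_rice number_blocks → Spec_rice number_blocks (rice number_blocks)

-- ===== LEMMAS AND PROOFS =====
lemma rice_loop_inv (k : Nat) (hk : 1 ≤ k) :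
    (PySem.List.pyRange 1 ((k : Int) + 1) 1).foldl riceStep (0, 1)
      = ((2 : Int) ^ k - 1, (2 : Int) ^ (k - 1)) := by
  induction k with
  | zero => omega
  | succ m ih =>
    rcases Nat.eq_or_lt_of_le hk with h1 | h1
    · -- m + 1 = 1
      have : m = 0 := by omega
      subst this
      rw [show ((1 : Nat) : Int) + 1 = 1 + 1 by norm_num, PySem.List.pyRange_one_singleton]
      simp [riceStep]
    · have hm : 1 ≤ m := by omega
      have hsplit : PySem.List.pyRange 1 ((m : Int) + 1 + 1) 1
          = PySem.List.pyRange 1 ((m : Int) + 1) 1 ++ [(m : Int) + 1] := by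
        exact PySem.List.pyRange_one_succ_right (by exact_mod_cast by omega)
      rw [show (((m + 1 : Nat)) : Int) + 1 = (m : Int) + 1 + 1 by push_cast; ring, hsplit,
        List.foldl_append, ih hm]
      have hne : ¬ ((m : Int) + 1 == 1) = true := by
        simp; omega
      simp only [List.foldl, riceStep, hne, Bool.false_eq_true, if_false, Prod.mk.injEq]
      refine ⟨?_, ?_⟩
      · have : (2 : Int) ^ (m - 1) * 2 = 2 ^ m := by
          rw [mul_comm, ← pow_succ']
          congr 1; omega
        rw [this]
        have h2 : (2 : Int) ^ (m + 1) = 2 ^ m * 2 := by rw [pow_succ]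
        rw [h2]; ring
      · have : (2 : Int) ^ (m - 1) * 2 = 2 ^ m := by
          rw [mul_comm, ← pow_succ']
          congr 1; omega
        rw [this, Nat.add_sub_cancel]

-- ===== VERDICT (by name: the statement is the Claim_ definition above) =====
theorem rice_spec : Claim_equal_rice := by
  intro n _
  unfold Spec_rice rice rice_alt
  by_cases h : n < 1
  · rw [PySem.List.pyRange_one_eq_nil (by omega)]
    simp [h]
  · have hk : 1 ≤ n.toNat := by omega
    have hb : n + 1 = ((n.toNat : Int)) + 1 := by omega
    rw [if_neg h, hb, rice_loop_inv n.toNat hk]
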